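-- pv_equiv track=rewrite | github.com/museum4punkt0/Ping-Backend | main/analysis/dashboard_modules.py | _dilution
-- ===== SOURCE A (Python) =====
-- def _dilution(chart_list, iterator):
--     data = []
--     last = 1
--     value = 0
--
--     if iterator < 20:
--         delta = 2
--     else:
--         delta = 3
--
--     data.append([chart_list[0]])
--
--     while last < len(chart_list):
--         data.append(chart_list[int(last):int(last + delta)])
--         last += delta
--
--     for index, _list in enumerate(data):
--         item = [0, 0]
--         for i in _list:
--             item[0] = i[0]
--             item[1] += i[1]
--
--         item[1] += value
--         value = item[1]
--
--         data[index] = item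
--
--     return data
-- ===== SOURCE B (Python) =====
-- def _dilution(chart_list, iterator):
--     delta = 2 if iterator < 20 else 3
--     first = chart_list[0]
--     out = [[first[0], first[1]]]
--     total = out[0][1]
--     cnt, x, s = 0, 0, 0
--     for e in chart_list[1:]:
--         x = e[0]
--         s += e[1]
--         cnt += 1
--         if cnt == delta:
--             total += s
--             out.append([x, total])
--             cnt, s = 0, 0
--     if cnt > 0:
--         total += s
--         out.append([x, total])
--     return out
-- ===== Notes on version B (the rewrite author's own statement) =====
-- stated objective: alternative
-- what changed: B is a fused single pass that threads the per-group x, group y-sum and running cumulative total through one loop, emitting an output item at each delta boundary, instead of A's two phases (materialise a list of slice chunks, then rewrite it in place with a second enumerate loop).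
import Mathlib
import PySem

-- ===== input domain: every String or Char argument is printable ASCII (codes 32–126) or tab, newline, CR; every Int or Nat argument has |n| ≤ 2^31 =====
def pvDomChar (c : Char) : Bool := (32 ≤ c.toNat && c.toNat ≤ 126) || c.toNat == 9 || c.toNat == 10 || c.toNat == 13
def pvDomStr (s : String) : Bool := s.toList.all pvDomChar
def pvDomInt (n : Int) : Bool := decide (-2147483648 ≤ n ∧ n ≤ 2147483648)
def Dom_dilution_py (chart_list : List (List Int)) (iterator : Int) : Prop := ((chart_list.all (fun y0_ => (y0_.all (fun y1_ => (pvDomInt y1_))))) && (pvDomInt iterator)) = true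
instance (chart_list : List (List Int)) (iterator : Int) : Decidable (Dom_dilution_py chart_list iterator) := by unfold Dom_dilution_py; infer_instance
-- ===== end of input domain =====

-- B fuses A's two phases (build chunk list, then rewrite it with a cumulative second pass)
-- into one pass over the elements; equivalence is about the return value only.

-- ===== PORT A =====
-- the while loop: data.append(chart_list[last:last+delta]); last += delta
-- (last and delta are the Python non-negative ints 1,3,5,… and 2/3; Nat here, same values)
def dilution_chunksA (xs : List (List Int)) (delta : Nat) (hd : 0 < delta) (last : Nat) :
    List (List (List Int)) :=
  if _h : last < xs.length then
    PySem.List.slice xs (some (last : Int)) (some ((last : Int) + (delta : Int))) ::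
      dilution_chunksA xs delta hd (last + delta)
  else []
termination_by xs.length - last

-- the for-loop over data with accumulator `value`; i[0]/i[1] via pyGet? (IndexError → .getD 0,
-- unreachable under Pre_)
def dilution_phase2 : List (List (List Int)) → Int → List (List Int)
  | [], _ => []
  | c :: rest, value =>
    let item := c.foldl (fun (it : Int × Int) i =>
      ((PySem.List.pyGet? i 0).getD 0, it.2 + (PySem.List.pyGet? i 1).getD 0)) (0, 0)
    let v := item.2 + value
    [item.1, v] :: dilution_phase2 rest v

def dilution_py (chart_list : List (List Int)) (iterator : Int) : List (List Int) :=
  let delta : Nat := if iterator < 20 then 2 else 3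
  -- chart_list[0]: IndexError on [] (excluded by Pre_), .getD [] here
  let first := (PySem.List.pyGet? chart_list 0).getD []
  dilution_phase2 ([first] :: dilution_chunksA chart_list delta (by show (0:Nat) < if iterator < 20 then 2 else 3; split <;> omega) 1) 0

-- ===== PORT B =====
-- the for-loop of Source B over chart_list[1:], state (out, total, cnt, x, s), plus the trailing
-- `if cnt > 0` append
def dilution_altLoop (delta : Nat) :
    List (List Int) → List (List Int) → Int → Nat → Int → Int → List (List Int)
  | [], out, total, cnt, x, s => if cnt > 0 then out ++ [[x, total + s]] else out
  | e :: r, out, total, cnt, _x, s =>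
    let x' := (PySem.List.pyGet? e 0).getD 0
    let s' := s + (PySem.List.pyGet? e 1).getD 0
    if cnt + 1 = delta then
      dilution_altLoop delta r (out ++ [[x', total + s']]) (total + s') 0 x' 0
    else
      dilution_altLoop delta r out total (cnt + 1) x' s'

def dilution_py_alt (chart_list : List (List Int)) (iterator : Int) : List (List Int) :=
  let delta : Nat := if iterator < 20 then 2 else 3
  match chart_list with
  | [] => []   -- Source B raises IndexError here (outside Pre_)
  | first :: rest =>
    let x0 := (PySem.List.pyGet? first 0).getD 0
    let y0 := (PySem.List.pyGet? first 1).getD 0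
    dilution_altLoop delta rest [[x0, y0]] y0 0 0 0

-- ===== PRECONDITION & SPEC =====
-- Pre_ excludes exactly the inputs where the Python A raises IndexError: the empty list
-- (chart_list[0]) and inner lists with fewer than 2 elements (i[0]/i[1]).
def Pre_dilution_py (chart_list : List (List Int)) (iterator : Int) : Prop :=
  chart_list ≠ [] ∧ ∀ l ∈ chart_list, 2 ≤ l.length
instance (chart_list : List (List Int)) (iterator : Int) : Decidable (Pre_dilution_py chart_list iterator) := by unfold Pre_dilution_py; infer_instance

def pvWitness_dilution_py : List (List Int) × Int := ([[1, 2], [3, 4], [5, 6]], 0)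

def Spec_dilution_py (chart_list : List (List Int)) (iterator : Int) (out : List (List Int)) : Prop := out = dilution_py_alt chart_list iterator
instance (chart_list : List (List Int)) (iterator : Int) (out : List (List Int)) : Decidable (Spec_dilution_py chart_list iterator out) := by unfold Spec_dilution_py; infer_instance

-- ===== CLAIM (what is proved, stated in full; the proofs are below) =====
def Claim_equal_dilution_py : Prop := ∀ (chart_list : List (List Int)) (iterator : Int), Dom_dilution_py chart_list iterator → Pre_dilution_py chart_list iterator → Spec_dilution_py chart_list iterator (dilution_py chart_list iterator)

-- ===== LEMMAS AND PROOFS =====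

-- chunking into groups of delta, front-to-back (proof-side reference shape)
def dilution_chunksOf (delta : Nat) : List (List Int) → List (List (List Int))
  | [] => []
  | a :: l => (a :: l.take (delta - 1)) :: dilution_chunksOf delta (l.drop (delta - 1))
termination_by l => l.length
decreasing_by simp

lemma chunksA_eq_chunksOf : ∀ (n : Nat) (xs : List (List Int)) (delta : Nat) (hd : 0 < delta)
    (last : Nat), xs.length - last ≤ n →
    dilution_chunksA xs delta hd last = dilution_chunksOf delta (xs.drop last) := by
  intro n
  induction n with
  | zero =>
    intro xs delta hd last hn
    have h : ¬ last < xs.length := by omega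
    rw [dilution_chunksA, dif_neg h, List.drop_eq_nil_iff.mpr (by omega)]
    simp [dilution_chunksOf]
  | succ n ih =>
    intro xs delta hd last hn
    by_cases h : last < xs.length
    · rw [dilution_chunksA, dif_pos h, ih xs delta hd (last + delta) (by omega)]
      have hx : xs.drop last ≠ [] := by
        intro he; have := List.drop_eq_nil_iff.mp he; omega
      obtain ⟨a, l, hl⟩ := List.exists_cons_of_ne_nil hx
      have hslice : PySem.List.slice xs (some (last : Int)) (some ((last : Int) + (delta : Int)))
          = (xs.drop last).take delta := PySem.List.slice_natCast_add xs last delta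
      have hdrop : xs.drop (last + delta) = (xs.drop last).drop delta := by
        rw [← List.drop_drop]
      rw [hslice, hdrop, hl]
      obtain ⟨d, rfl⟩ : ∃ d, delta = d + 1 := ⟨delta - 1, by omega⟩
      rw [dilution_chunksOf]
      simp
    · rw [dilution_chunksA, dif_neg h, List.drop_eq_nil_iff.mpr (by omega)]
      simp [dilution_chunksOf]

-- the fused loop, started at a group boundary, equals "emit chunks then phase2"
lemma altLoop_eq_phase2 (delta : Nat) (hδ : delta = 2 ∨ delta = 3) :
    ∀ (n : Nat) (r : List (List Int)) (out : List (List Int)) (total x : Int),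
      r.length ≤ n →
      dilution_altLoop delta r out total 0 x 0
        = out ++ dilution_phase2 (dilution_chunksOf delta r) total := by
  intro n
  induction n with
  | zero =>
    intro r out total x hn
    have : r = [] := List.eq_nil_of_length_eq_zero (by omega)
    subst this
    simp [dilution_altLoop, dilution_chunksOf, dilution_phase2]
  | succ n ih =>
    intro r out total x hn
    rcases hδ with h2 | h3
    · subst h2
      match r with
      | [] => simp [dilution_altLoop, dilution_chunksOf, dilution_phase2]
      | [a] =>
        simp [dilution_altLoop, dilution_chunksOf, dilution_phase2]
        omega
      | a :: b :: r' =>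
        simp only [dilution_altLoop]
        norm_num
        rw [ih r' _ _ _ (by simp at hn ⊢; omega)]
        simp [dilution_chunksOf, dilution_phase2, List.append_assoc]
        constructor
        · omega
        · congr 1
          omega
    · subst h3
      match r with
      | [] => simp [dilution_altLoop, dilution_chunksOf, dilution_phase2]
      | [a] =>
        simp [dilution_altLoop, dilution_chunksOf, dilution_phase2]
        omega
      | [a, b] =>
        simp [dilution_altLoop, dilution_chunksOf, dilution_phase2]
        omega
      | a :: b :: c :: r' =>
        simp only [dilution_altLoop]
        norm_num
        rw [ih r' _ _ _ (by simp at hn ⊢; omega)]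
        simp [dilution_chunksOf, dilution_phase2, List.append_assoc]
        constructor
        · omega
        · congr 1
          omega

theorem dilution_py_spec : Claim_equal_dilution_py := by
  intro chart_list iterator _hDom hPre
  unfold Spec_dilution_py dilution_py dilution_py_alt
  obtain ⟨hne, _⟩ := hPre
  obtain ⟨first, rest, hcl⟩ := List.exists_cons_of_ne_nil hne
  subst hcl
  dsimp only
  set delta : Nat := if iterator < 20 then 2 else 3 with hδdef
  have hδ : delta = 2 ∨ delta = 3 := by rw [hδdef]; split <;> simp
  have hfirst : (PySem.List.pyGet? (first :: rest) 0).getD [] = first := by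
    rw [show (0 : Int) = ((0 : Nat) : Int) by norm_num, PySem.List.pyGet?_natCast]
    simp
  rw [chunksA_eq_chunksOf (first :: rest).length (first :: rest) _ _ 1 (by omega)]
  have hdrop : (first :: rest).drop 1 = rest := by simp
  rw [hdrop, hfirst]
  rw [altLoop_eq_phase2 delta hδ rest.length rest _ _ _ (le_refl _)]
  simp [dilution_phase2]
  rw [hδdef]
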